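-- pv_equiv track=rewrite | github.com/pmareke/katas | sum-of-pairs/sum_of_pairs.py | process
-- ===== SOURCE A (Python) =====
-- from typing import Dict, List, Optional
--
-- def process(input_list: List[int], target: int) -> Optional[List[int]]:
--     pairs: Dict[int, List[int]] = {}
--     for first_index, _ in enumerate(input_list):
--         for second_index in range(first_index + 1, len(input_list)):
--             first_number = input_list[first_index]
--             second_number = input_list[second_index]
--             if first_number + second_number == target:
--                 pairs[second_index] = [first_number, second_number]
--
--     if not pairs:
--         return None
--
--     smallest_index = sorted(pairs.keys())[0]
--     return pairs[smallest_index]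
-- ===== SOURCE B (Python) =====
-- from typing import List, Optional
--
-- def process(input_list: List[int], target: int) -> Optional[List[int]]:
--     seen = set()
--     for x in input_list:
--         if target - x in seen:
--             return [target - x, x]
--         seen.add(x)
--     return None
-- ===== Notes on version B (the rewrite author's own statement) =====
-- stated objective: faster
-- what changed: Replaced A's O(n^2) double loop over all index pairs plus a dict keyed by second index and a sort of its keys with a single left-to-right pass keeping a set of seen values, returning at the first element whose complement was already seen.
import Mathlib
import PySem

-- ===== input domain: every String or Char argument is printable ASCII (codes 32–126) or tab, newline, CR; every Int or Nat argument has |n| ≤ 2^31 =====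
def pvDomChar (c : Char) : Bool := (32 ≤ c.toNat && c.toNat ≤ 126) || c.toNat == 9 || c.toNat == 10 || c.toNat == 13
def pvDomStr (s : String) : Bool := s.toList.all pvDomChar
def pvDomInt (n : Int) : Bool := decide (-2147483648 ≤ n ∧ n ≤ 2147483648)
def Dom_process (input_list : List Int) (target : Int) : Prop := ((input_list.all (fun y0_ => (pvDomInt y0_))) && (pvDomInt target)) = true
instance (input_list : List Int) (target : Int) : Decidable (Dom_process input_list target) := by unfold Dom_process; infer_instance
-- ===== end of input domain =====

-- B replaces A's quadratic all-pairs scan (dict keyed by second index + key sort) with a single pass keeping a set of already-seen values.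

-- ===== PORT A =====

def process (input_list : List Int) (target : Int) : Option (List Int) :=
  let pairs : PySem.Dict Int (List Int) :=
    (PySem.List.enumerate input_list 0).foldl (fun pairs fi =>
      (PySem.List.pyRange (fi.1 + 1) (PySem.List.len input_list) 1).foldl (fun pairs si =>
        let first_number := PySem.List.pyGetD input_list fi.1 0
        let second_number := PySem.List.pyGetD input_list si 0
        if first_number + second_number = target then pairs.insert si [first_number, second_number]
        else pairs) pairs) PySem.Dict.empty
  if pairs.size = 0 then none
  else
    match PySem.List.pyGet? (PySem.List.sorted pairs.keys (fun x => x) false) 0 with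
    | none => none
    | some smallest =>
      match pairs.get? smallest with
      | none => none
      | some v => some v

-- ===== PORT B =====
def processAltGo (target : Int) (seen : PySem.Set Int) : List Int → Option (List Int)
  | [] => none
  | x :: rest =>
    if PySem.Set.contains seen (target - x) then some [target - x, x]
    else processAltGo target (PySem.Set.add seen x) rest

def process_alt (input_list : List Int) (target : Int) : Option (List Int) :=
  processAltGo target PySem.Set.empty input_list

-- ===== PRECONDITION & SPEC =====
def Spec_process (input_list : List Int) (target : Int) (out : Option (List Int)) : Prop := out = process_alt input_list target
instance (input_list : List Int) (target : Int) (out : Option (List Int)) : Decidable (Spec_process input_list target out) := by unfold Spec_process; infer_instance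

-- ===== CLAIM (what is proved, stated in full; the proofs are below) =====
def Claim_equal_process : Prop := ∀ (input_list : List Int) (target : Int), Dom_process input_list target → Spec_process input_list target (process input_list target)

-- ===== LEMMAS AND PROOFS =====

theorem go_eq (t : Int) (rest pre : List Int) :
    processAltGo t (PySem.Set.ofList pre) rest =
    ((List.range rest.length).find? (fun k => decide ((t - rest.getD k 0) ∈ pre ++ rest.take k))).map
      (fun k => [t - rest.getD k 0, rest.getD k 0]) := by
  induction rest generalizing pre with
  | nil => simp [processAltGo]
  | cons x rs ih =>
    simp only [processAltGo, List.length_cons, List.range_succ_eq_map, List.find?_cons]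
    by_cases h : (t - x) ∈ pre
    · simp [h, PySem.Set.mem_ofList]
    · have hc : PySem.Set.contains (PySem.Set.ofList pre) (t - x) = false := by
        simp [PySem.Set.mem_ofList, h]
      rw [hc]
      simp only [Bool.false_eq_true, if_false]
      rw [(PySem.Set.ofList_append_singleton pre x).symm, ih (pre ++ [x])]
      have h0 : (decide ((t - (x :: rs).getD 0 0) ∈ pre ++ (x :: rs).take 0)) = false := by
        simp [h]
      rw [h0, List.find?_map, Option.map_map]
      rw [show ((fun k => decide ((t - (x :: rs).getD k 0) ∈ pre ++ (x :: rs).take k)) ∘ Nat.succ)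
            = (fun k => decide ((t - rs.getD k 0) ∈ (pre ++ [x]) ++ rs.take k)) from funext fun k => by
            simp only [Function.comp, List.getD_cons_succ, List.take_succ_cons]
            rw [List.append_cons]]
      rw [show ((fun k => [t - (x :: rs).getD k 0, (x :: rs).getD k 0]) ∘ Nat.succ)
            = (fun k => [t - rs.getD k 0, rs.getD k 0]) from funext fun k => by
            simp [Function.comp]]

theorem inner_get (a : List Int) (t fi lo hi : Int) (d : PySem.Dict Int (List Int)) (j : Int) :
    ((PySem.List.pyRange lo hi 1).foldl (fun d si =>
        if PySem.List.pyGetD a fi 0 + PySem.List.pyGetD a si 0 = t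
        then d.insert si [PySem.List.pyGetD a fi 0, PySem.List.pyGetD a si 0] else d) d).get? j
    = if lo ≤ j ∧ j < hi ∧ PySem.List.pyGetD a fi 0 + PySem.List.pyGetD a j 0 = t
      then some [PySem.List.pyGetD a fi 0, PySem.List.pyGetD a j 0] else d.get? j := by
  induction hn : (hi - lo).toNat generalizing lo d with
  | zero =>
    rw [PySem.List.pyRange_one_eq_nil (by omega)]
    simp only [List.foldl_nil]
    rw [if_neg (by omega)]
  | succ n ih =>
    rw [PySem.List.pyRange_one_cons (by omega)]
    simp only [List.foldl_cons]
    rw [ih (lo + 1) _ (by omega)]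
    by_cases hj : j = lo
    · subst hj
      rw [if_neg (by omega)]
      by_cases hcond : PySem.List.pyGetD a fi 0 + PySem.List.pyGetD a j 0 = t
      · rw [if_pos hcond, if_pos ⟨le_refl j, by omega, hcond⟩, PySem.Dict.get?_insert_self]
      · rw [if_neg hcond, if_neg (by tauto)]
    · have hstep : (if PySem.List.pyGetD a fi 0 + PySem.List.pyGetD a lo 0 = t
          then d.insert lo [PySem.List.pyGetD a fi 0, PySem.List.pyGetD a lo 0] else d).get? j = d.get? j := by
        split_ifs with hc
        · exact PySem.Dict.get?_insert_of_ne _ _ hj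
        · rfl
      rw [hstep]
      by_cases hin : lo ≤ j ∧ j < hi ∧ PySem.List.pyGetD a fi 0 + PySem.List.pyGetD a j 0 = t
      · rw [if_pos ⟨by omega, hin.2⟩, if_pos hin]
      · rw [if_neg (fun h => hin ⟨by omega, h.2⟩), if_neg hin]

theorem outer_get (a : List Int) (t : Int) (lo : Int) (d : PySem.Dict Int (List Int)) (j : Int) :
    ((PySem.List.pyRange lo (PySem.List.len a) 1).foldl (fun d fi =>
        (PySem.List.pyRange (fi + 1) (PySem.List.len a) 1).foldl (fun d si =>
          if PySem.List.pyGetD a fi 0 + PySem.List.pyGetD a si 0 = t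
          then d.insert si [PySem.List.pyGetD a fi 0, PySem.List.pyGetD a si 0] else d) d) d).get? j
    = if j < PySem.List.len a ∧ ∃ i ∈ PySem.List.pyRange lo j 1,
          PySem.List.pyGetD a i 0 + PySem.List.pyGetD a j 0 = t
      then some [t - PySem.List.pyGetD a j 0, PySem.List.pyGetD a j 0] else d.get? j := by
  induction hn : (PySem.List.len a - lo).toNat generalizing lo d with
  | zero =>
    rw [PySem.List.pyRange_one_eq_nil (by omega)]
    simp only [List.foldl_nil]
    rw [if_neg]
    rintro ⟨hj, i, hi, -⟩
    rw [PySem.List.mem_pyRange_one] at hi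
    omega
  | succ n ih =>
    rw [PySem.List.pyRange_one_cons (by omega)]
    simp only [List.foldl_cons]
    rw [ih (lo + 1) _ (by omega), inner_get]
    by_cases hih : j < PySem.List.len a ∧ ∃ i ∈ PySem.List.pyRange (lo + 1) j 1,
        PySem.List.pyGetD a i 0 + PySem.List.pyGetD a j 0 = t
    · rw [if_pos hih, if_pos]
      obtain ⟨hj, i, hi, hsum⟩ := hih
      rw [PySem.List.mem_pyRange_one] at hi
      exact ⟨hj, i, PySem.List.mem_pyRange_one.mpr (by omega), hsum⟩
    · rw [if_neg hih]
      by_cases hinn : lo + 1 ≤ j ∧ j < PySem.List.len a ∧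
          PySem.List.pyGetD a lo 0 + PySem.List.pyGetD a j 0 = t
      · rw [if_pos hinn, if_pos ⟨hinn.2.1, lo,
          PySem.List.mem_pyRange_one.mpr (by omega), hinn.2.2⟩]
        have : PySem.List.pyGetD a lo 0 = t - PySem.List.pyGetD a j 0 := by omega
        rw [this]
      · rw [if_neg hinn, if_neg]
        rintro ⟨hj, i, hi, hsum⟩
        rw [PySem.List.mem_pyRange_one] at hi
        by_cases hlo : i = lo
        · subst hlo; exact hinn ⟨by omega, hj, hsum⟩
        · exact hih ⟨hj, i, PySem.List.mem_pyRange_one.mpr (by omega), hsum⟩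

def pvRef (a : List Int) (t : Int) : Option (List Int) :=
  ((List.range a.length).find? (fun k => decide ((t - a.getD k 0) ∈ a.take k))).map
    (fun k => [t - a.getD k 0, a.getD k 0])

def pvDict (a : List Int) (t : Int) : PySem.Dict Int (List Int) :=
  (PySem.List.pyRange 0 (PySem.List.len a) 1).foldl (fun pairs fi =>
    (PySem.List.pyRange (fi + 1) (PySem.List.len a) 1).foldl (fun pairs si =>
      if PySem.List.pyGetD a fi 0 + PySem.List.pyGetD a si 0 = t
      then pairs.insert si [PySem.List.pyGetD a fi 0, PySem.List.pyGetD a si 0] else pairs) pairs)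
    PySem.Dict.empty

theorem process_eq (a : List Int) (t : Int) : process a t =
    (if (pvDict a t).size = 0 then none else
      match PySem.List.pyGet? (PySem.List.sorted (pvDict a t).keys (fun x => x) false) 0 with
      | none => none
      | some smallest =>
        match (pvDict a t).get? smallest with
        | none => none
        | some v => some v) := by
  simp only [process, pvDict, PySem.List.enumerate_eq_map_pyRange a 0, List.foldl_map]

theorem pvDict_get (a : List Int) (t : Int) (j : Int) :
    (pvDict a t).get? j
    = if j < PySem.List.len a ∧ ∃ i ∈ PySem.List.pyRange 0 j 1,
          PySem.List.pyGetD a i 0 + PySem.List.pyGetD a j 0 = t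
      then some [t - PySem.List.pyGetD a j 0, PySem.List.pyGetD a j 0] else none := by
  unfold pvDict
  rw [outer_get]
  simp only [PySem.Dict.get?_empty]

theorem getD_mem_take (a : List Int) (m k : Nat) (hm : m < k) (hlen : m < a.length) :
    a.getD m 0 ∈ a.take k := by
  have hlt : m < (a.take k).length := by
    simp only [List.length_take]
    omega
  have heq : (a.take k)[m] = a.getD m 0 := by
    rw [List.getElem_take, List.getD_eq_getElem a 0 hlen]
  exact heq ▸ List.getElem_mem hlt

theorem cond_iff (a : List Int) (t : Int) (k : Nat) (hk : k < a.length) :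
    ((k : Int) < PySem.List.len a ∧ ∃ i ∈ PySem.List.pyRange 0 (k : Int) 1,
        PySem.List.pyGetD a i 0 + PySem.List.pyGetD a (k : Int) 0 = t)
    ↔ (t - a.getD k 0) ∈ a.take k := by
  constructor
  · rintro ⟨-, i, hi, hsum⟩
    rw [PySem.List.mem_pyRange_one] at hi
    rw [PySem.List.pyGetD_of_nonneg a 0 hi.1, PySem.List.pyGetD_natCast] at hsum
    have hmk : i.toNat < k := by omega
    have hmem := getD_mem_take a i.toNat k hmk (by omega)
    have heq : a.getD i.toNat 0 = t - a.getD k 0 := by omega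
    rwa [heq] at hmem
  · intro hmem
    refine ⟨by rw [PySem.List.len_eq]; exact_mod_cast hk, ?_⟩
    obtain ⟨m, hm, hmeq⟩ := List.getElem_of_mem hmem
    have hmk : m < k := by
      have := hm
      simp only [List.length_take] at this
      omega
    have hma : m < a.length := by
      have := hm
      simp only [List.length_take] at this
      omega
    refine ⟨(m : Int), PySem.List.mem_pyRange_one.mpr ⟨by positivity, by exact_mod_cast hmk⟩, ?_⟩
    rw [PySem.List.pyGetD_natCast, PySem.List.pyGetD_natCast]
    have h1 : a.getD m 0 = t - a.getD k 0 := by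
      rw [List.getD_eq_getElem a 0 hma, ← List.getElem_take (h := hm), hmeq]
    omega

theorem range_find?_min {n k : Nat} {p : Nat → Bool}
    (h : (List.range n).find? p = some k) : ∀ j < k, p j = false := by
  rw [List.find?_eq_some_iff_append] at h
  obtain ⟨hpk, as, bs, hsplit, hall⟩ := h
  have hlen : as.length + (bs.length + 1) = n := by
    have h0 := congrArg List.length hsplit
    simp at h0
    omega
  have hk : k = as.length := by
    have h1 : (List.range n)[as.length]? = some as.length := by
      rw [List.getElem?_eq_getElem (by simp; omega)]
      simp [List.getElem_range]
    rw [hsplit, List.getElem?_append_right (le_refl as.length)] at h1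
    simp at h1
    omega
  intro j hj
  have h2 : (List.range n)[j]? = some j := by
    rw [List.getElem?_eq_getElem (by simp; omega)]
    simp [List.getElem_range]
  rw [hsplit, List.getElem?_append_left (by omega)] at h2
  simpa using hall j (List.mem_of_getElem? h2)

theorem a_eq_ref (a : List Int) (t : Int) : process a t = pvRef a t := by
  rw [process_eq]
  rcases hitems : (pvDict a t).items with _ | ⟨q, rest⟩
  · have hDe : pvDict a t = PySem.Dict.empty := PySem.Dict.ext (by rw [hitems]; rfl)
    have hsize : (pvDict a t).size = 0 := by rw [hDe]; rfl
    rw [if_pos hsize]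
    unfold pvRef
    rw [List.find?_eq_none.mpr ?_]
    · rfl
    intro k hkr
    simp only [List.mem_range] at hkr
    simp only [decide_eq_true_eq]
    intro hmem
    have hC := (cond_iff a t k hkr).mpr hmem
    have hg := pvDict_get a t (k : Int)
    rw [if_pos hC, hDe, PySem.Dict.get?_empty] at hg
    simp at hg
  · have hsize : (pvDict a t).size ≠ 0 := by
      simp only [PySem.Dict.size, hitems]
      simp
    rw [if_neg hsize]
    have hqmem : q.1 ∈ (pvDict a t).keys :=
      PySem.Dict.mem_keys_of_mem_items _ (by rw [hitems]; exact List.mem_cons_self)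
    have hqget : (pvDict a t).get? q.1 ≠ none := fun h0 =>
      ((PySem.Dict.get?_eq_none_iff_not_mem_keys _ _).mp h0) hqmem
    have hCq : q.1 < PySem.List.len a ∧ ∃ i ∈ PySem.List.pyRange 0 q.1 1,
        PySem.List.pyGetD a i 0 + PySem.List.pyGetD a q.1 0 = t := by
      by_contra hC
      have hg := pvDict_get a t q.1
      rw [if_neg hC] at hg
      exact hqget hg
    -- q.1 is nonnegative and below the length
    have hq0 : 0 ≤ q.1 := by
      obtain ⟨-, i, hi, -⟩ := hCq
      rw [PySem.List.mem_pyRange_one] at hi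
      omega
    have hqlen : q.1.toNat < a.length := by
      have := hCq.1
      rw [PySem.List.len_eq] at this
      omega
    -- the reference search succeeds
    rcases href : (List.range a.length).find? (fun k => decide ((t - a.getD k 0) ∈ a.take k)) with _ | k
    · exfalso
      have hcast : ((q.1.toNat : Int)) = q.1 := Int.toNat_of_nonneg hq0
      have hCq' := hCq
      rw [← hcast] at hCq'
      have hp := (cond_iff a t q.1.toNat hqlen).mp hCq'
      have hfin := List.find?_eq_none.mp href q.1.toNat (List.mem_range.mpr hqlen)
      simp only [decide_eq_true_eq] at hfin
      exact hfin hp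
    · -- find? = some k
      have hpk : ((t - a.getD k 0) ∈ a.take k) := by
        have := List.find?_some href
        simpa using this
      have hkn : k < a.length := by
        have := List.mem_of_find?_eq_some href
        simpa using this
      have hCk : (k : Int) < PySem.List.len a ∧ ∃ i ∈ PySem.List.pyRange 0 (k : Int) 1,
          PySem.List.pyGetD a i 0 + PySem.List.pyGetD a (k : Int) 0 = t :=
        (cond_iff a t k hkn).mpr hpk
      have hkkey : ((k : Int)) ∈ (pvDict a t).keys := by
        by_contra hnk
        have hg := pvDict_get a t (k : Int)
        rw [if_pos hCk] at hg
        rw [(PySem.Dict.get?_eq_none_iff_not_mem_keys _ _).mpr hnk] at hg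
        simp at hg
      -- the sorted key list
      rcases hs : PySem.List.sorted (pvDict a t).keys (fun x => x) false with _ | ⟨m, tl⟩
      · exfalso
        have := PySem.List.length_sorted (xs := (pvDict a t).keys) (key := fun x => x) (rev := false)
        rw [hs] at this
        have hkl : (pvDict a t).keys.length = rest.length + 1 := by
          simp [PySem.Dict.keys, hitems]
        simp [hkl] at this
      · have hm0 : PySem.List.pyGet? (m :: tl) (0 : Int) = some m := by
          simp [PySem.List.pyGet?, PySem.List.pyIdx?]
        rw [hm0]
        have hmkeys : m ∈ (pvDict a t).keys := by
          have : m ∈ PySem.List.sorted (pvDict a t).keys (fun x => x) false := by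
            rw [hs]; exact List.mem_cons_self
          rwa [PySem.List.mem_sorted] at this
        have hmget : (pvDict a t).get? m ≠ none := fun h0 =>
          ((PySem.Dict.get?_eq_none_iff_not_mem_keys _ _).mp h0) hmkeys
        have hCm : m < PySem.List.len a ∧ ∃ i ∈ PySem.List.pyRange 0 m 1,
            PySem.List.pyGetD a i 0 + PySem.List.pyGetD a m 0 = t := by
          by_contra hC
          have hg := pvDict_get a t m
          rw [if_neg hC] at hg
          exact hmget hg
        have hm0' : 0 ≤ m := by
          obtain ⟨-, i, hi, -⟩ := hCm
          rw [PySem.List.mem_pyRange_one] at hi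
          omega
        have hmlen : m.toNat < a.length := by
          have := hCm.1
          rw [PySem.List.len_eq] at this
          omega
        have hpm : ((t - a.getD m.toNat 0) ∈ a.take m.toNat) := by
          have hcast : ((m.toNat : Int)) = m := Int.toNat_of_nonneg hm0'
          have hCm' := hCm
          rw [← hcast] at hCm'
          exact (cond_iff a t m.toNat hmlen).mp hCm'
        -- minimality of k and of m
        have hmk : ¬ m.toNat < k := by
          intro hlt
          have hmin := range_find?_min href m.toNat hlt
          simp only [decide_eq_false_iff_not] at hmin
          exact hmin hpm
        have hkm : m ≤ (k : Int) := PySem.List.key_head_sorted_le _ _ hs (k : Int) hkkey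
        have hmeqk : m = (k : Int) := by omega
        subst hmeqk
        have hg := pvDict_get a t (k : Int)
        rw [if_pos hCk, PySem.List.pyGetD_natCast] at hg
        simp only [hg]
        unfold pvRef
        rw [href]
        rfl

theorem alt_eq_ref (a : List Int) (t : Int) : process_alt a t = pvRef a t := by
  unfold process_alt pvRef
  have h := go_eq t a []
  simp only [List.nil_append] at h
  exact h

-- ===== VERDICT (by name: the statement is the Claim_ definition above) =====
theorem process_spec : Claim_equal_process := by
  intro a t _
  unfold Spec_process
  rw [alt_eq_ref, a_eq_ref]
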